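-- pv_equiv track=rewrite | github.com/naziktazik13/jstris_ai | v5.py | get_all_possible_rotations
-- ===== SOURCE A (Python) =====
-- def get_all_possible_rotations(piece_shape):
--     """Возвращает все возможные повороты фигуры"""
--     if not piece_shape:
--         return []
--
--     rotations = []
--     current_rotation = piece_shape
--
--     # Для симметрии, добавляем до 4 поворотов (0°, 90°, 180°, 270°)
--     for _ in range(4):
--         rotations.append(current_rotation)
--         # Поворот на 90° по часовой стрелке
--         current_rotation = [(c, -r) for r, c in current_rotation]
--         # Нормализация после поворота
--         min_r = min(r for r, _ in current_rotation)
--         min_c = min(c for _, c in current_rotation)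
--         current_rotation = [(r - min_r, c - min_c) for r, c in current_rotation]
--
--         # Проверка, есть ли уже такой поворот
--         if current_rotation in rotations:
--             break
--
--     return rotations
-- ===== SOURCE B (Python) =====
-- def _normalize(cells):
--     min_r = min(r for r, _ in cells)
--     min_c = min(c for _, c in cells)
--     return [(r - min_r, c - min_c) for r, c in cells]
--
--
-- def get_all_possible_rotations(piece_shape):
--     if not piece_shape:
--         return []
--     # Closed-form k-fold rotation maps applied directly to the raw shape,
--     # each normalized independently (no successive rotate-and-carry loop).
--     n1 = _normalize([(c, -r) for r, c in piece_shape])    # 90 degrees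
--     n2 = _normalize([(-r, -c) for r, c in piece_shape])   # 180 degrees
--     n3 = _normalize([(-c, r) for r, c in piece_shape])    # 270 degrees
--     # Decision tree on the shape's rotational symmetry.
--     if n1 == piece_shape:
--         return [piece_shape]
--     if n2 == n1 or n2 == piece_shape:
--         return [piece_shape, n1]
--     if n3 == n1:  # the normalized 90-degree state is 180-degree symmetric
--         return [piece_shape, n1, n2]
--     return [piece_shape, n1, n2, n3]
-- ===== Notes on version B (the rewrite author's own statement) =====
-- stated objective: alternative
-- what changed: Replaces A's rotate-until-repeat loop with accumulator membership by loop-free closed-form 90/180/270-degree coordinate maps applied directly to the raw shape, each normalized independently, and a decision tree on the shape's rotational symmetry (the third branch reduces to a single 180-degree-symmetry test n3 == n1).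
import Mathlib
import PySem

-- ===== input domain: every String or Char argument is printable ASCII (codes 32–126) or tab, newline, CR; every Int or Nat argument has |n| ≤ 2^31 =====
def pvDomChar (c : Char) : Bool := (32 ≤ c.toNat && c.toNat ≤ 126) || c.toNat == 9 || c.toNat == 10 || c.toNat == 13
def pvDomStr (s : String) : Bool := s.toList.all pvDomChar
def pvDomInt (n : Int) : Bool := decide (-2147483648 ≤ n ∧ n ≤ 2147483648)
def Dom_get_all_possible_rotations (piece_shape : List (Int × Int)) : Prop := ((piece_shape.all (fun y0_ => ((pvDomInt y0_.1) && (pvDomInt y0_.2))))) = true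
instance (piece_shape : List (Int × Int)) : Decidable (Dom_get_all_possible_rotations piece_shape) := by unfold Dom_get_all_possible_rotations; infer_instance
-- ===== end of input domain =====

-- B replaces A's rotate-until-repeat loop by closed-form k-fold rotation maps of the raw
-- shape, each normalized independently, and a symmetry decision tree; same value, no speed claim.

-- ===== PORT A =====
-- Python's min over a nonempty sequence (the [] case is unreachable: A only calls it on
-- a rotation of the nonempty piece_shape).
def pvMin : List Int → Int
  | [] => 0
  | x :: xs => xs.foldl min x

-- A's `for _ in range(4)` loop with break, state = (rotations, current_rotation).
def pvLoopA : Nat → List (List (Int × Int)) → List (Int × Int) → List (List (Int × Int))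
  | 0, rotations, _ => rotations
  | n + 1, rotations, cur =>
    let rotations := rotations ++ [cur]
    let rotated := cur.map (fun p => (p.2, -p.1))
    let minR := pvMin (rotated.map Prod.fst)
    let minC := pvMin (rotated.map Prod.snd)
    let next := rotated.map (fun p => (p.1 - minR, p.2 - minC))
    if next ∈ rotations then rotations else pvLoopA n rotations next

def get_all_possible_rotations (piece_shape : List (Int × Int)) : List (List (Int × Int)) :=
  if piece_shape = [] then [] else pvLoopA 4 [] piece_shape

-- ===== PORT B =====
-- Source B's _normalize helper.
def pvNorm (cells : List (Int × Int)) : List (Int × Int) :=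
  let minR := pvMin (cells.map Prod.fst)
  let minC := pvMin (cells.map Prod.snd)
  cells.map (fun p => (p.1 - minR, p.2 - minC))

def get_all_possible_rotations_alt (piece_shape : List (Int × Int)) : List (List (Int × Int)) :=
  if piece_shape = [] then []
  else
    let n1 := pvNorm (piece_shape.map (fun p => (p.2, -p.1)))
    let n2 := pvNorm (piece_shape.map (fun p => (-p.1, -p.2)))
    let n3 := pvNorm (piece_shape.map (fun p => (-p.2, p.1)))
    if n1 = piece_shape then [piece_shape]
    else if n2 = n1 ∨ n2 = piece_shape then [piece_shape, n1]
    else if n3 = n1 then [piece_shape, n1, n2]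
    else [piece_shape, n1, n2, n3]

-- ===== PRECONDITION & SPEC =====
def Spec_get_all_possible_rotations (piece_shape : List (Int × Int)) (out : List (List (Int × Int))) : Prop := out = get_all_possible_rotations_alt piece_shape
instance (piece_shape : List (Int × Int)) (out : List (List (Int × Int))) : Decidable (Spec_get_all_possible_rotations piece_shape out) := by unfold Spec_get_all_possible_rotations; infer_instance

-- ===== CLAIM (what is proved, stated in full; the proofs are below) =====
def Claim_equal_get_all_possible_rotations : Prop := ∀ (piece_shape : List (Int × Int)), Dom_get_all_possible_rotations piece_shape → Spec_get_all_possible_rotations piece_shape (get_all_possible_rotations piece_shape)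

-- ===== LEMMAS AND PROOFS =====

-- 90° clockwise rotation, and a uniform shift, as whole-shape maps.
def pvRot (s : List (Int × Int)) : List (Int × Int) := s.map (fun p => (p.2, -p.1))
def pvShift (a b : Int) (s : List (Int × Int)) : List (Int × Int) :=
  s.map (fun p => (p.1 + a, p.2 + b))

theorem pvMin_map_add (k : Int) : ∀ (l : List Int), l ≠ [] →
    pvMin (l.map (fun x => x + k)) = pvMin l + k := by
  intro l hl
  match l with
  | x :: xs =>
    show (xs.map (fun x => x + k)).foldl min (x + k) = xs.foldl min x + k
    clear hl
    induction xs generalizing x with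
    | nil => rfl
    | cons y ys ih => simpa [List.foldl, min_add_add_right] using ih (min x y)

theorem pvNorm_shift (a b : Int) (s : List (Int × Int)) (hs : s ≠ []) :
    pvNorm (pvShift a b s) = pvNorm s := by
  have hfst : (pvShift a b s).map Prod.fst = (s.map Prod.fst).map (fun x => x + a) := by
    simp [pvShift, List.map_map]
  have hsnd : (pvShift a b s).map Prod.snd = (s.map Prod.snd).map (fun x => x + b) := by
    simp [pvShift, List.map_map]
  have h1 : pvMin ((pvShift a b s).map Prod.fst) = pvMin (s.map Prod.fst) + a := by
    rw [hfst, pvMin_map_add a _ (by simpa using hs)]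
  have h2 : pvMin ((pvShift a b s).map Prod.snd) = pvMin (s.map Prod.snd) + b := by
    rw [hsnd, pvMin_map_add b _ (by simpa using hs)]
  unfold pvNorm
  rw [h1, h2]
  simp only [pvShift, List.map_map]
  apply List.map_congr_left
  rintro ⟨x, y⟩ _
  simp only [Function.comp_apply, Prod.mk.injEq]
  constructor <;> omega

-- pvNorm s is a shift of s, hence pvNorm is idempotent (on nonempty input).
theorem pvNorm_eq_shift (s : List (Int × Int)) :
    pvNorm s = pvShift (-(pvMin (s.map Prod.fst))) (-(pvMin (s.map Prod.snd))) s := by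
  simp only [pvNorm, pvShift]
  apply List.map_congr_left
  rintro ⟨x, y⟩ _
  simp [sub_eq_add_neg]

theorem pvNorm_idem (s : List (Int × Int)) (hs : s ≠ []) :
    pvNorm (pvNorm s) = pvNorm s := by
  conv_lhs => rw [pvNorm_eq_shift s]
  exact pvNorm_shift _ _ s hs

-- rotating a shifted shape = shifting the rotated shape.
theorem pvRot_shift (a b : Int) (s : List (Int × Int)) :
    pvRot (pvShift a b s) = pvShift b (-a) (pvRot s) := by
  unfold pvRot pvShift
  simp only [List.map_map]
  apply List.map_congr_left
  rintro ⟨x, y⟩ _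
  simp [Int.add_comm]

-- the key absorption: normalize ∘ rot ∘ normalize = normalize ∘ rot.
theorem pvNorm_rot_norm (s : List (Int × Int)) (hs : s ≠ []) :
    pvNorm (pvRot (pvNorm s)) = pvNorm (pvRot s) := by
  rw [pvNorm_eq_shift s, pvRot_shift, pvNorm_shift _ _ (pvRot s) (by simpa [pvRot] using hs)]

theorem pvRot_rot (s : List (Int × Int)) :
    pvRot (pvRot s) = s.map (fun p => (-p.1, -p.2)) := by
  simp [pvRot, List.map_map]

theorem pvRot_rot_rot (s : List (Int × Int)) :
    pvRot (pvRot (pvRot s)) = s.map (fun p => (-p.2, p.1)) := by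
  simp [pvRot, List.map_map]

theorem pvRot_four (s : List (Int × Int)) :
    pvRot (pvRot (pvRot (pvRot s))) = s := by
  simp only [pvRot, List.map_map]
  conv_rhs => rw [← List.map_id s]
  apply List.map_congr_left
  rintro ⟨x, y⟩ _
  simp

theorem pvRot_ne_nil (s : List (Int × Int)) (hs : s ≠ []) : pvRot s ≠ [] := by
  simpa [pvRot] using hs

-- A's inline rotate+normalize step equals pvNorm ∘ pvRot.
theorem pvStep_eq (cur : List (Int × Int)) :
    ((cur.map (fun p => (p.2, -p.1))).map
      (fun p => (p.1 - pvMin ((cur.map (fun p => (p.2, -p.1))).map Prod.fst),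
                 p.2 - pvMin ((cur.map (fun p => (p.2, -p.1))).map Prod.snd)))) =
    pvNorm (pvRot cur) := rfl

-- ===== VERDICT (by name: the statement is the Claim_ definition above) =====
theorem get_all_possible_rotations_spec : Claim_equal_get_all_possible_rotations := by
  intro s0 _
  unfold Spec_get_all_possible_rotations get_all_possible_rotations get_all_possible_rotations_alt
  by_cases h0 : s0 = []
  · simp [h0]
  · simp only [h0, if_false]
    -- names for the three directly-computed rotations of B
    set N1 := pvNorm (s0.map (fun p => (p.2, -p.1))) with hN1
    set N2 := pvNorm (s0.map (fun p => (-p.1, -p.2))) with hN2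
    set N3 := pvNorm (s0.map (fun p => (-p.2, p.1))) with hN3
    have hrot : pvRot s0 = s0.map (fun p => (p.2, -p.1)) := rfl
    have hrne : pvRot s0 ≠ [] := pvRot_ne_nil s0 h0
    -- successive rotate+normalize states equal the direct ones
    have e1 : pvNorm (pvRot s0) = N1 := by rw [hrot, hN1]
    have e2 : pvNorm (pvRot N1) = N2 := by
      rw [hN1, ← hrot, pvNorm_rot_norm _ hrne, pvRot_rot, hN2]
    have e3 : pvNorm (pvRot N2) = N3 := by
      have h2ne : pvRot (pvRot s0) ≠ [] := pvRot_ne_nil _ hrne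
      rw [hN2, ← pvRot_rot, pvNorm_rot_norm _ h2ne, pvRot_rot_rot, hN3]
    have e4 : pvNorm (pvRot N3) = pvNorm s0 := by
      have h3ne : pvRot (pvRot (pvRot s0)) ≠ [] := pvRot_ne_nil _ (pvRot_ne_nil _ hrne)
      rw [hN3, ← pvRot_rot_rot, pvNorm_rot_norm _ h3ne, pvRot_four]
    -- unfold A's four loop iterations
    show pvLoopA 4 [] s0 = _
    by_cases b1 : N1 = s0
    · -- first repeat immediately
      simp only [pvLoopA, pvStep_eq, e1, List.nil_append]
      simp [b1]
    · simp only [pvLoopA, pvStep_eq, e1, List.nil_append]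
      rw [if_neg (by simp [b1]), if_neg b1]
      by_cases b2 : N2 = N1 ∨ N2 = s0
      · simp only [e2]
        rw [if_pos (by simp only [List.mem_cons,
              List.nil_append, List.cons_append, List.not_mem_nil, or_false]; tauto),
            if_pos b2]
        rfl
      · simp only [e2]
        rw [if_neg (by simp only [List.mem_cons,
              List.nil_append, List.cons_append, List.not_mem_nil, or_false]; tauto),
            if_neg b2]
        rw [not_or] at b2
        by_cases b3 : N3 = N1
        · simp only [e3]
          rw [if_pos (by simp [b3]), if_pos b3]
          rfl
        · -- show N3 ∉ [s0, N1, N2]: N3 = s0 or N3 = N2 lead to contradictions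
          have c1 : N3 ≠ s0 := by
            intro hc
            -- s0 is normalized, and N1 = pvNorm(rot N3) = pvNorm s0 = s0
            have hs0norm : pvNorm s0 = s0 := by
              rw [← hc, hN3, pvNorm_idem _ (by simpa using h0), ← hN3, hc]
            have : N1 = s0 := by
              calc N1 = pvNorm (pvRot s0) := e1.symm
                _ = pvNorm (pvRot N3) := by rw [hc]
                _ = pvNorm s0 := e4
                _ = s0 := hs0norm
            exact b1 this
          have c2 : N3 ≠ N2 := by
            intro hc
            -- applying pvNorm∘pvRot: pvNorm s0 = N3 = N2, then N1 = N2
            have h4 : pvNorm s0 = N3 := by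
              calc pvNorm s0 = pvNorm (pvRot N3) := e4.symm
                _ = pvNorm (pvRot N2) := by rw [hc]
                _ = N3 := e3
            have h5 : N1 = N2 := by
              calc N1 = pvNorm (pvRot s0) := e1.symm
                _ = pvNorm (pvRot (pvNorm s0)) := (pvNorm_rot_norm _ h0).symm
                _ = pvNorm (pvRot N3) := by rw [h4]
                _ = pvNorm s0 := e4
                _ = N3 := h4
                _ = N2 := hc
            exact b2.1 h5.symm
          simp only [e3]
          rw [if_neg (by simp [c1, c2, b3]), if_neg b3]
          split <;> rfl
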